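-- pv_equiv track=rewrite | github.com/AlanValdevenito/Teoria-de-Algoritmos | SEGUNDA-CURSADA/EJERCICIOS/4-PROGRAMACION-DINAMICA/pd_11.py | operaciones_solucion
-- ===== SOURCE A (Python) =====
-- AUMENTAR = 'mas1'
--
-- DUPLICAR = 'por2'
--
-- def operaciones_solucion(k, mem):
--     solucion = []
--
--     while k > 0:
--
--         if (k % 2 == 0):
--             solucion.append(DUPLICAR)
--             k = k // 2
--
--         else:
--             solucion.append(AUMENTAR)
--             k -= 1
--
--     solucion.reverse()
--     return solucion
-- ===== SOURCE B (Python) =====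
-- AUMENTAR = 'mas1'
--
-- DUPLICAR = 'por2'
--
-- def operaciones_solucion(k, mem):
--     if k <= 0:
--         return []
--     bits = bin(k)[2:]
--     ops = [AUMENTAR]
--     for b in bits[1:]:
--         ops.append(DUPLICAR)
--         if b == '1':
--             ops.append(AUMENTAR)
--     return ops
-- ===== Notes on version B (the rewrite author's own statement) =====
-- stated objective: alternative
-- what changed: B reads the answer directly off the binary expansion of k (MSB first), emitting 'mas1' for the leading bit and 'por2' (+ 'mas1' on 1-bits) for the rest, built forward with no reverse, instead of A's greedy halve/decrement loop followed by a reverse.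
import Mathlib
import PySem

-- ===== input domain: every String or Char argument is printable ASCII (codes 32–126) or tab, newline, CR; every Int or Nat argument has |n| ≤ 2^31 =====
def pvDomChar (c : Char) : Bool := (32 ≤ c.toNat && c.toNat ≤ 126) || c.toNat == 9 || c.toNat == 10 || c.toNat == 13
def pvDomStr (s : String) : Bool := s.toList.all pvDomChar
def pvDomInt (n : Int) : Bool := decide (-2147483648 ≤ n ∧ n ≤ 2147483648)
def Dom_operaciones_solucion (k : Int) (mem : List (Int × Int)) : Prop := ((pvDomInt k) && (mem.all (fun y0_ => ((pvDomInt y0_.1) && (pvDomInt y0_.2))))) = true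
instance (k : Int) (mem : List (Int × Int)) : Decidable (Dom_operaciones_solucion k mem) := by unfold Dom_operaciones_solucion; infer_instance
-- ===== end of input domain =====

-- ===== PORT A =====
-- A: greedy loop — while k>0 halve when even / decrement when odd, appending, then reverse.
def pvLoopA (k : Int) (sol : List String) : List String :=
  if k > 0 then
    if PySem.Int.mod k 2 = 0 then
      pvLoopA (PySem.Int.floordiv k 2) (sol ++ ["por2"])
    else
      pvLoopA (k - 1) (sol ++ ["mas1"])
  else sol
termination_by k.toNat
decreasing_by
  · have h2 : PySem.Int.floordiv k 2 = k / 2 := PySem.Int.floordiv_eq_ediv_of_pos (by omega)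
    omega
  · omega

def operaciones_solucion (k : Int) (mem : List (Int × Int)) : List String :=
  (pvLoopA k []).reverse

-- ===== PORT B =====
-- B: emit operations from the binary expansion of k, most-significant bit first; no reverse.
-- bin(k)[2:] ported as the MSB-first list of bits of k.toNat (true = '1').
def pvBits (n : Nat) : List Bool :=
  if n = 0 then [] else pvBits (n / 2) ++ [decide (n % 2 = 1)]

def operaciones_solucion_alt (k : Int) (mem : List (Int × Int)) : List String :=
  if k ≤ 0 then []
  else
    let bits := pvBits k.toNat
    bits.tail.foldl (fun ops b =>
      let ops := ops ++ ["por2"]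
      if b then ops ++ ["mas1"] else ops) ["mas1"]

-- ===== PRECONDITION & SPEC =====
def Spec_operaciones_solucion (k : Int) (mem : List (Int × Int)) (out : List String) : Prop := out = operaciones_solucion_alt k mem
instance (k : Int) (mem : List (Int × Int)) (out : List String) : Decidable (Spec_operaciones_solucion k mem out) := by unfold Spec_operaciones_solucion; infer_instance

-- ===== CLAIM (what is proved, stated in full; the proofs are below) =====
def Claim_equal_operaciones_solucion : Prop := ∀ (k : Int) (mem : List (Int × Int)), Dom_operaciones_solucion k mem → Spec_operaciones_solucion k mem (operaciones_solucion k mem)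

-- ===== LEMMAS AND PROOFS =====

-- what one bit of B's loop body contributes
def pvG (b : Bool) : List String := if b then ["por2", "mas1"] else ["por2"]

-- the operation list B emits for a positive n, as a closed expression
def pvEmit (n : Nat) : List String :=
  if n = 0 then [] else "mas1" :: (pvBits n).tail.flatMap pvG

theorem pvBits_pos (n : Nat) (h : n ≠ 0) :
    pvBits n = pvBits (n / 2) ++ [decide (n % 2 = 1)] := by
  rw [pvBits]; simp [h]

theorem pvBits_ne_nil {n : Nat} (h : n ≠ 0) : pvBits n ≠ [] := by
  rw [pvBits_pos n h]; simp

theorem pvBits_cons {n : Nat} (h : n ≠ 0) : ∃ a t, pvBits n = a :: t := by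
  cases hc : pvBits n with
  | nil => exact absurd hc (pvBits_ne_nil h)
  | cons a t => exact ⟨a, t, rfl⟩

theorem pvFoldl_g (bs : List Bool) (init : List String) :
    bs.foldl (fun ops b =>
      let ops := ops ++ ["por2"]
      if b then ops ++ ["mas1"] else ops) init = init ++ bs.flatMap pvG := by
  induction bs generalizing init with
  | nil => simp
  | cons b t ih =>
    cases b <;> simp only [List.foldl_cons] <;> rw [ih] <;> simp [pvG]

theorem pvAlt_eq_emit (k : Int) (mem : List (Int × Int)) :
    operaciones_solucion_alt k mem = pvEmit k.toNat := by
  unfold operaciones_solucion_alt pvEmit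
  by_cases hk : k ≤ 0
  · have : k.toNat = 0 := by omega
    simp [hk, this]
  · have h0 : k.toNat ≠ 0 := by omega
    rw [if_neg hk, if_neg h0]
    obtain ⟨a, t, hb⟩ := pvBits_cons h0
    rw [hb, pvFoldl_g]
    simp

theorem pvEmit_even {n : Nat} (h0 : 0 < n) (he : n % 2 = 0) :
    pvEmit n = pvEmit (n / 2) ++ ["por2"] := by
  have h2 : n / 2 ≠ 0 := by omega
  obtain ⟨a, t, hb⟩ := pvBits_cons h2
  unfold pvEmit
  rw [if_neg (by omega), if_neg h2, pvBits_pos n (by omega), hb]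
  simp [he, pvG]

theorem pvEmit_odd {n : Nat} (ho : n % 2 = 1) :
    pvEmit n = pvEmit (n - 1) ++ ["mas1"] := by
  by_cases h1 : n = 1
  · subst h1
    have h0 : pvBits 0 = [] := by rw [pvBits]; rfl
    have hb1 : pvBits 1 = [true] := by rw [pvBits_pos 1 (by omega), h0]; rfl
    simp [pvEmit, hb1]
  · have h3 : 3 ≤ n := by omega
    have hq : n / 2 ≠ 0 := by omega
    obtain ⟨a, t, hb⟩ := pvBits_cons hq
    have hn1 : (n - 1) / 2 = n / 2 := by omega
    unfold pvEmit
    rw [if_neg (by omega), if_neg (by omega), pvBits_pos n (by omega),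
        pvBits_pos (n - 1) (by omega), hn1, hb]
    have hm : (n - 1) % 2 = 0 := by omega
    simp [ho, hm, pvG]

-- A's loop equals sol ++ reverse of B's emitted list (invariant of the accumulator)
theorem pvLoopA_emit (n : Nat) : ∀ (k : Int), k.toNat = n → ∀ (sol : List String),
    pvLoopA k sol = sol ++ (pvEmit n).reverse := by
  induction n using Nat.strong_induction_on with
  | _ n ih =>
    intro k hk sol
    rw [pvLoopA]
    by_cases hpos : k > 0
    · rw [if_pos hpos]
      have hmod : PySem.Int.mod k 2 = k % 2 := PySem.Int.mod_eq_emod_of_pos (by omega)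
      by_cases hev : k % 2 = 0
      · have hfd : PySem.Int.floordiv k 2 = k / 2 := PySem.Int.floordiv_eq_ediv_of_pos (by omega)
        rw [if_pos (by rw [hmod]; exact hev), hfd,
            ih ((k / 2).toNat) (by omega) (k / 2) rfl]
        have h2 : (k / 2).toNat = n / 2 := by omega
        rw [h2, pvEmit_even (n := n) (by omega) (by omega)]
        simp
      · rw [if_neg (by rw [hmod]; exact hev),
            ih ((k - 1).toNat) (by omega) (k - 1) rfl]
        have h2 : (k - 1).toNat = n - 1 := by omega
        rw [h2, pvEmit_odd (n := n) (show n % 2 = 1 by omega)]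
        simp
    · rw [if_neg hpos]
      have h0 : n = 0 := by omega
      simp [h0, pvEmit]

-- ===== VERDICT (by name: the statement is the Claim_ definition above) =====
theorem operaciones_solucion_spec : Claim_equal_operaciones_solucion := by
  intro k mem _
  unfold Spec_operaciones_solucion operaciones_solucion
  rw [pvAlt_eq_emit, pvLoopA_emit k.toNat k rfl []]
  simp
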